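-- pv_equiv track=rewrite | github.com/Hari1201007haran/TinyCompiler16 | main.py | generate_machine_code
-- ===== SOURCE A (Python) =====
-- def generate_machine_code(assembly):
--     opcode_map = {
--         'LABEL': '0000',
--         'MOV': '0001',
--         'CMP': '0010',
--         'JGE': '0011',
--         'JNE': '0100',
--         'PRINT': '0101',
--         'ADD': '0110',
--         'JMP': '0111'
--     }
--     label_address = {
--         'main': '0001',
--         'WHILE_START': '0010',
--         'WHILE_END': '0101',
--         'SKIP_IF': '0110'
--     }
--     register_map = {
--         'i': '0001'
--     }
--
--     def to_4bit(val):
--         return format(int(val), '04b')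
--
--     def get_label_bin(label):
--         return format(int(label_address[label], 2), '04b')
--
--     machine_code = []
--     for line in assembly:
--         parts = line.split()
--         op = parts[0]
--
--         if op == 'LABEL':
--             instr = f"{opcode_map['LABEL']}00000000{get_label_bin(parts[1])}"
--         elif op == 'MOV':
--             reg = register_map[parts[1].strip(',')]
--             imm = to_4bit(parts[2])
--             instr = f"{opcode_map['MOV']}{reg}0000{imm}"
--         elif op == 'CMP':
--             reg = register_map[parts[1].strip(',')]
--             imm = to_4bit(parts[2])
--             instr = f"{opcode_map['CMP']}{reg}0000{imm}"
--         elif op == 'JGE':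
--             addr = get_label_bin(parts[1])
--             instr = f"{opcode_map['JGE']}00000000{addr}"
--         elif op == 'JNE':
--             addr = get_label_bin(parts[1])
--             instr = f"{opcode_map['JNE']}00000000{addr}"
--         elif op == 'PRINT':
--             reg = register_map[parts[1]]
--             instr = f"{opcode_map['PRINT']}{reg}00000000"
--         elif op == 'ADD':
--             reg = register_map[parts[1].strip(',')]
--             imm = to_4bit(parts[2])
--             instr = f"{opcode_map['ADD']}{reg}0000{imm}"
--         elif op == 'JMP':
--             addr = get_label_bin(parts[1])
--             instr = f"{opcode_map['JMP']}00000000{addr}"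
--         else:
--             continue
--
--         if len(instr) != 16:
--             raise ValueError(f"Instruction length error: '{instr}' is not 16 bits.")
--         machine_code.append(instr)
--
--     return machine_code
-- ===== SOURCE B (Python) =====
-- # Numeric rewrite: each line becomes a 16-bit integer word (opcode*4096 + reg*256 + imm),
-- # then all words are rendered to binary in a second pass with format(w, '016b').
-- _OPC = {'LABEL': 0, 'MOV': 1, 'CMP': 2, 'JGE': 3, 'JNE': 4, 'PRINT': 5, 'ADD': 6, 'JMP': 7}
-- _LBL = {'main': 1, 'WHILE_START': 2, 'WHILE_END': 5, 'SKIP_IF': 6}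
-- _REG = {'i': 1}
--
--
-- def _word(parts):
--     op = parts[0]
--     if op not in _OPC:
--         return None
--     o = _OPC[op]
--     if op in ('LABEL', 'JGE', 'JNE', 'JMP'):
--         return o * 4096 + _LBL[parts[1]]
--     if op == 'PRINT':
--         return o * 4096 + _REG[parts[1]] * 256
--     return o * 4096 + _REG[parts[1].strip(',')] * 256 + int(parts[2])
--
--
-- def generate_machine_code(assembly):
--     words = [w for w in (_word(line.split()) for line in assembly) if w is not None]
--     return [format(w, '016b') for w in words]
-- ===== Notes on version B (the rewrite author's own statement) =====
-- stated objective: alternative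
-- what changed: B encodes each line as a 16-bit integer word (opcode*4096 + register*256 + immediate, label address in the low nibble) in one pass and renders all words to binary strings with format(w,'016b') in a second pass, instead of A's per-branch concatenation of 4-bit string fragments with a parse-then-reformat label round-trip and a length assertion.
-- outside the precondition, e.g. on generate_machine_code(['MOV i, -1']): A returns ['000100010000-001'], B returns ['0001000011111111']
import Mathlib
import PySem

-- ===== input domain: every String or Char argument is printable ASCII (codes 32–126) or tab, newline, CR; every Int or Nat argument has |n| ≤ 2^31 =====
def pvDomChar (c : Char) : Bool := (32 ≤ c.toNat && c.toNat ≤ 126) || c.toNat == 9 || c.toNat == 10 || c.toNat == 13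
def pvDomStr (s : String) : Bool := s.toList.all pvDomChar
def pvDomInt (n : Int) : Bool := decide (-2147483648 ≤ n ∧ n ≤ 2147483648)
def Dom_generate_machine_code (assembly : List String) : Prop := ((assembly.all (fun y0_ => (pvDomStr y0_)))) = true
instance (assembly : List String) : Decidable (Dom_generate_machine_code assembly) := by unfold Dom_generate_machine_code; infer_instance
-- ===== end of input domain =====

-- B re-encodes each line as a 16-bit integer word (opcode*4096 + reg*256 + imm, label address in
-- the low nibble) and renders all words to binary in a second pass, instead of A's per-branch
-- concatenation of 4-bit string fragments (objective: alternative). Equivalence is about the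
-- RETURN value on Pre_ (where A raises no exception).

-- ===== PORT A =====
-- format(v, '04b') = binary of |v| with sign, zero-filled to width 4 (Python's zfill rule)
def pvFormat04b (v : Int) : List Char :=
  PySem.Chars.zfill ((if v < 0 then ['-'] else []) ++ Nat.toDigits 2 v.natAbs) 4

def pvA_opcodeMap : PySem.Dict (List Char) (List Char) :=
  PySem.Dict.ofList [("LABEL".toList, "0000".toList), ("MOV".toList, "0001".toList),
    ("CMP".toList, "0010".toList), ("JGE".toList, "0011".toList), ("JNE".toList, "0100".toList),
    ("PRINT".toList, "0101".toList), ("ADD".toList, "0110".toList), ("JMP".toList, "0111".toList)]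

def pvA_labelAddress : PySem.Dict (List Char) (List Char) :=
  PySem.Dict.ofList [("main".toList, "0001".toList), ("WHILE_START".toList, "0010".toList),
    ("WHILE_END".toList, "0101".toList), ("SKIP_IF".toList, "0110".toList)]

def pvA_registerMap : PySem.Dict (List Char) (List Char) :=
  PySem.Dict.ofList [("i".toList, "0001".toList)]

-- to_4bit(val); a ValueError of int() is outside Pre_ (default [])
def pvA_to4bit (val : List Char) : List Char :=
  match PySem.Int.ofChars? val with
  | some v => pvFormat04b v
  | none => []

-- get_label_bin(label); a KeyError / ValueError is outside Pre_ (default [])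
def pvA_getLabelBin (label : List Char) : List Char :=
  match pvA_labelAddress.get? label with
  | some s => match PySem.Int.ofCharsBase? s 2 with
              | some v => pvFormat04b v
              | none => []
  | none => []

-- the loop body: parts = line.split(); the if/elif cascade; 'continue' = none;
-- out-of-range parts[i] (IndexError) and failed register lookups (KeyError) are outside Pre_ (default [])
def pvA_step (acc : List String) (line : String) : List String :=
  let parts := PySem.Chars.split₀ line.toList
  let op := (PySem.List.pyGet? parts 0).getD []
  let instr? : Option (List Char) :=
    if op = "LABEL".toList then
      some ((pvA_opcodeMap.getD "LABEL".toList []) ++ "00000000".toList ++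
        pvA_getLabelBin ((PySem.List.pyGet? parts 1).getD []))
    else if op = "MOV".toList then
      let reg := pvA_registerMap.getD (PySem.Chars.stripChars ((PySem.List.pyGet? parts 1).getD []) ",".toList) []
      let imm := pvA_to4bit ((PySem.List.pyGet? parts 2).getD [])
      some ((pvA_opcodeMap.getD "MOV".toList []) ++ reg ++ "0000".toList ++ imm)
    else if op = "CMP".toList then
      let reg := pvA_registerMap.getD (PySem.Chars.stripChars ((PySem.List.pyGet? parts 1).getD []) ",".toList) []
      let imm := pvA_to4bit ((PySem.List.pyGet? parts 2).getD [])
      some ((pvA_opcodeMap.getD "CMP".toList []) ++ reg ++ "0000".toList ++ imm)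
    else if op = "JGE".toList then
      some ((pvA_opcodeMap.getD "JGE".toList []) ++ "00000000".toList ++
        pvA_getLabelBin ((PySem.List.pyGet? parts 1).getD []))
    else if op = "JNE".toList then
      some ((pvA_opcodeMap.getD "JNE".toList []) ++ "00000000".toList ++
        pvA_getLabelBin ((PySem.List.pyGet? parts 1).getD []))
    else if op = "PRINT".toList then
      let reg := pvA_registerMap.getD ((PySem.List.pyGet? parts 1).getD []) []
      some ((pvA_opcodeMap.getD "PRINT".toList []) ++ reg ++ "00000000".toList)
    else if op = "ADD".toList then
      let reg := pvA_registerMap.getD (PySem.Chars.stripChars ((PySem.List.pyGet? parts 1).getD []) ",".toList) []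
      let imm := pvA_to4bit ((PySem.List.pyGet? parts 2).getD [])
      some ((pvA_opcodeMap.getD "ADD".toList []) ++ reg ++ "0000".toList ++ imm)
    else if op = "JMP".toList then
      some ((pvA_opcodeMap.getD "JMP".toList []) ++ "00000000".toList ++
        pvA_getLabelBin ((PySem.List.pyGet? parts 1).getD []))
    else none
  match instr? with
  | none => acc
  | some instr => if instr.length = 16 then acc ++ [String.ofList instr] else acc
    -- 'length ≠ 16' raises ValueError in Python: outside Pre_ (acc is a dummy)

def generate_machine_code (assembly : List String) : List String :=
  assembly.foldl pvA_step []

-- ===== PORT B =====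
def pvB_opc : PySem.Dict (List Char) Int :=
  PySem.Dict.ofList [("LABEL".toList, 0), ("MOV".toList, 1), ("CMP".toList, 2), ("JGE".toList, 3),
    ("JNE".toList, 4), ("PRINT".toList, 5), ("ADD".toList, 6), ("JMP".toList, 7)]

def pvB_lbl : PySem.Dict (List Char) Int :=
  PySem.Dict.ofList [("main".toList, 1), ("WHILE_START".toList, 2), ("WHILE_END".toList, 5),
    ("SKIP_IF".toList, 6)]

def pvB_reg : PySem.Dict (List Char) Int :=
  PySem.Dict.ofList [("i".toList, 1)]

-- _word(parts): one 16-bit word per line, none = unknown opcode;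
-- IndexError/KeyError/ValueError cases are outside Pre_ (defaults [] / 0)
def pvB_word? (parts : List (List Char)) : Option Int :=
  let op := (PySem.List.pyGet? parts 0).getD []
  match pvB_opc.get? op with
  | none => none
  | some o =>
    if op = "LABEL".toList ∨ op = "JGE".toList ∨ op = "JNE".toList ∨ op = "JMP".toList then
      some (o * 4096 + pvB_lbl.getD ((PySem.List.pyGet? parts 1).getD []) 0)
    else if op = "PRINT".toList then
      some (o * 4096 + pvB_reg.getD ((PySem.List.pyGet? parts 1).getD []) 0 * 256)
    else
      some (o * 4096 +
        pvB_reg.getD (PySem.Chars.stripChars ((PySem.List.pyGet? parts 1).getD []) ",".toList) 0 * 256 +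
        (PySem.Int.ofChars? ((PySem.List.pyGet? parts 2).getD [])).getD 0)

-- format(w, '016b')
def pvFormat016b (v : Int) : List Char :=
  PySem.Chars.zfill ((if v < 0 then ['-'] else []) ++ Nat.toDigits 2 v.natAbs) 16

def generate_machine_code_alt (assembly : List String) : List String :=
  ((assembly.map (fun line => pvB_word? (PySem.Chars.split₀ line.toList))).filterMap id).map
    (fun w => String.ofList (pvFormat016b w))

-- ===== PRECONDITION & SPEC =====
-- Pre_ excludes exactly the lines on which A raises — an empty/whitespace line (IndexError on
-- parts[0]), a jump/LABEL line whose target is not one of the four known labels or a register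
-- operand other than 'i' (KeyError), a reg+imm line whose immediate is not int()-parsable or is
-- ≥ 16 or ≤ -8 (ValueError from the 16-bit length check) — plus the negative immediates -7..-1,
-- on which A returns a 16-character string containing '-' (not machine code), which B cannot
-- sensibly match.
def pvLineOK (line : String) : Bool :=
  match PySem.Chars.split₀ line.toList with
  | [] => false
  | op :: args =>
    if op = "LABEL".toList ∨ op = "JGE".toList ∨ op = "JNE".toList ∨ op = "JMP".toList then
      match args with
      | l :: _ => decide (l = "main".toList ∨ l = "WHILE_START".toList ∨ l = "WHILE_END".toList ∨ l = "SKIP_IF".toList)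
      | [] => false
    else if op = "MOV".toList ∨ op = "CMP".toList ∨ op = "ADD".toList then
      match args with
      | r :: v :: _ =>
        decide (PySem.Chars.stripChars r ",".toList = "i".toList) &&
          (match PySem.Int.ofChars? v with
           | some n => decide (0 ≤ n ∧ n ≤ 15)
           | none => false)
      | _ => false
    else if op = "PRINT".toList then
      match args with
      | r :: _ => decide (r = "i".toList)
      | [] => false
    else true

def Pre_generate_machine_code (assembly : List String) : Prop :=
  assembly.all pvLineOK = true

instance (assembly : List String) : Decidable (Pre_generate_machine_code assembly) := by
  unfold Pre_generate_machine_code; infer_instance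

def pvWitness_generate_machine_code : List String :=
  ["LABEL main", "MOV i, 5", "CMP i, 10", "JGE WHILE_END", "PRINT i", "ADD i, 1", "JMP WHILE_START", "NOP x"]

def Spec_generate_machine_code (assembly : List String) (out : List String) : Prop := out = generate_machine_code_alt assembly
instance (assembly : List String) (out : List String) : Decidable (Spec_generate_machine_code assembly out) := by unfold Spec_generate_machine_code; infer_instance

-- ===== CLAIM (what is proved, stated in full; the proofs are below) =====
def Claim_equal_generate_machine_code : Prop := ∀ (assembly : List String), Dom_generate_machine_code assembly → Pre_generate_machine_code assembly → Spec_generate_machine_code assembly (generate_machine_code assembly)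

-- ===== LEMMAS AND PROOFS =====

-- pyGet? of the first/second/third element of a cons (parts[0], parts[1], parts[2])
theorem pvGetD0 {α : Type} (x : α) (l : List α) (d : α) :
    (PySem.List.pyGet? (x :: l) (0 : Int)).getD d = x := by simp [pysem]
theorem pvGetD1 {α : Type} (x y : α) (l : List α) (d : α) :
    (PySem.List.pyGet? (x :: y :: l) (1 : Int)).getD d = y := by simp [pysem]
theorem pvGetD2 {α : Type} (x y z : α) (l : List α) (d : α) :
    (PySem.List.pyGet? (x :: y :: z :: l) (2 : Int)).getD d = z := by simp [pysem]

-- one OK line: A's step appends exactly the rendering of B's word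
theorem pvA_step_eq (acc : List String) (line : String) (h : pvLineOK line = true) :
    pvA_step acc line =
      acc ++ ((pvB_word? (PySem.Chars.split₀ line.toList)).toList.map
        (fun w => String.ofList (pvFormat016b w))) := by
  unfold pvLineOK at h
  unfold pvA_step pvB_word?
  cases hs : PySem.Chars.split₀ line.toList with
  | nil => rw [hs] at h; simp at h
  | cons op args =>
    rw [hs] at h
    dsimp only at h
    simp only [hs]
    by_cases hjmp : op = "LABEL".toList ∨ op = "JGE".toList ∨ op = "JNE".toList ∨ op = "JMP".toList
    · rw [if_pos hjmp] at h
      cases args with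
      | nil => simp at h
      | cons l rest =>
        simp only [decide_eq_true_eq] at h
        rcases hjmp with h1 | h1 | h1 | h1 <;> subst h1 <;>
          rcases h with h2 | h2 | h2 | h2 <;> subst h2 <;>
            · rw [pvGetD0, pvGetD1]; rfl
    · rw [if_neg hjmp] at h
      push Not at hjmp
      obtain ⟨hL, hG, hN, hM⟩ := hjmp
      by_cases hri : op = "MOV".toList ∨ op = "CMP".toList ∨ op = "ADD".toList
      · rw [if_pos hri] at h
        cases args with
        | nil => simp at h
        | cons r rest =>
          cases rest with
          | nil => simp at h
          | cons v rest2 =>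
            simp only [Bool.and_eq_true, decide_eq_true_eq] at h
            obtain ⟨hreg, himm⟩ := h
            cases hv : PySem.Int.ofChars? v with
            | none => rw [hv] at himm; simp at himm
            | some n =>
              rw [hv] at himm
              simp only [decide_eq_true_eq] at himm
              obtain ⟨hn0, hn15⟩ := himm
              rcases hri with h1 | h1 | h1 <;> subst h1 <;>
                · rw [pvGetD0, pvGetD1, pvGetD2, hreg]
                  simp only [pvA_to4bit, hv]
                  interval_cases n <;> rfl
      · rw [if_neg hri] at h
        push Not at hri
        obtain ⟨hV, hC, hA⟩ := hri
        by_cases hp : op = "PRINT".toList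
        · rw [if_pos hp] at h
          cases args with
          | nil => simp at h
          | cons r rest =>
            simp only [decide_eq_true_eq] at h
            subst hp h
            rw [pvGetD0, pvGetD1]; rfl
        · rw [if_neg hp] at h
          -- unknown opcode: A continues, B's word is none
          have hb : pvB_opc.get? op = none := by
            simp_all [pvB_opc, PySem.Dict.ofList, PySem.Dict.update, PySem.Dict.get?_insert]
          cases args with
          | nil =>
            rw [pvGetD0, hb]
            simp_all
          | cons a rest =>
            rw [pvGetD0, hb]
            simp_all

theorem pvA_loop_eq (l : List String) (acc : List String) (h : l.all pvLineOK = true) :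
    l.foldl pvA_step acc =
      acc ++ (((l.map (fun line => pvB_word? (PySem.Chars.split₀ line.toList))).filterMap id).map
        (fun w => String.ofList (pvFormat016b w))) := by
  induction l generalizing acc with
  | nil => simp
  | cons x xs ih =>
    simp only [List.all_cons, Bool.and_eq_true] at h
    simp only [List.foldl_cons, List.map_cons, List.filterMap_cons]
    rw [ih _ h.2, pvA_step_eq acc x h.1]
    cases pvB_word? (PySem.Chars.split₀ x.toList) <;> simp

-- ===== VERDICT (by name: the statement is the Claim_ definition above) =====
theorem generate_machine_code_spec : Claim_equal_generate_machine_code := by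
  intro assembly _ hpre
  unfold Spec_generate_machine_code generate_machine_code generate_machine_code_alt
  exact pvA_loop_eq assembly [] hpre
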